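-- pv_equiv track=rewrite | github.com/chuheeseung/coding-test-study | programmers/주식가격.py | solution
-- ===== SOURCE A (Python) =====
-- from collections import deque
--
-- def solution(prices):
--     answer = []
--     queue = deque(prices)
--
--     while queue:
--         count = 0
--         pop_queue = queue.popleft()
--
--         for q in queue:
--             count += 1
--
--             if q < pop_queue:
--                 break
--
--         answer.append(count)
--
--     return answer
-- ===== SOURCE B (Python) =====
-- def solution(prices):
--     n = len(prices)
--     out = []
--     stack = []  # (index, price) pairs; prices strictly decreasing from bottom to top
--     for i in range(n - 1, -1, -1):
--         p = prices[i]
--         while stack and stack[-1][1] >= p: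
--             stack.pop()
--         out.append(stack[-1][0] - i if stack else n - 1 - i)
--         stack.append((i, p))
--     out.reverse()
--     return out
-- ===== Notes on version B (the rewrite author's own statement) =====
-- stated objective: faster
-- what changed: Replaced the per-element rescan of the remaining queue with a single right-to-left pass maintaining a monotonic stack of (index, price); each answer is the index difference to the stack top after popping entries with price >= current.
import Mathlib
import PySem

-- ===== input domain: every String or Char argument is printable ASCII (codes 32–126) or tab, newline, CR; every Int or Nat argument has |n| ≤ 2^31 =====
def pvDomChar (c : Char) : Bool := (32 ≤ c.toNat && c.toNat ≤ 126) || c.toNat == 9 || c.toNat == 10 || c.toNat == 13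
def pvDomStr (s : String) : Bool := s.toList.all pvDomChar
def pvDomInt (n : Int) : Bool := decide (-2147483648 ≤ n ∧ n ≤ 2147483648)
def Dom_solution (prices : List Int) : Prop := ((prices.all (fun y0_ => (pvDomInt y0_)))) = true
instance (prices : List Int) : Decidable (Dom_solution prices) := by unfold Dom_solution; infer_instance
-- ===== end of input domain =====

-- B replaces A's O(n^2) rescan of the queue with one right-to-left monotonic-stack pass (O(n)).

-- ===== PORT A =====
-- the inner 'for q in queue: count += 1; if q < pop_queue: break'
def cntA (p : Int) : List Int → Int
  | [] => 0
  | q :: qs => if q < p then 1 else 1 + cntA p qs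

-- the outer 'while queue: pop_queue = queue.popleft(); …; answer.append(count)'
def solution (prices : List Int) : List Int :=
  match prices with
  | [] => []
  | p :: rest => cntA p rest :: solution rest

-- ===== PORT B =====
-- Source B's inner 'while stack and stack[-1][1] >= p: stack.pop()'
-- (the stack's top is the list HEAD here; Source B keeps the top at the list's end)
def popGE (p : Int) : List (Int × Int) → List (Int × Int)
  | [] => []
  | (j, q) :: st => if q ≥ p then popGE p st else (j, q) :: st

-- Source B's 'for i in range(n-1, -1, -1)' loop: the recursion processes the suffix
-- (larger indices) first, exactly like the descending loop; returns (stack, out)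
def goB (n : Int) : Int → List Int → List (Int × Int) × List Int
  | _, [] => ([], [])
  | i, p :: rest =>
    let so := goB n (i + 1) rest
    let st' := popGE p so.1
    let a : Int := match st' with
      | [] => n - 1 - i
      | (j, _) :: _ => j - i
    ((i, p) :: st', a :: so.2)

def solution_alt (prices : List Int) : List Int :=
  (goB (prices.length : Int) 0 prices).2

-- ===== PRECONDITION & SPEC =====
def Spec_solution (prices : List Int) (out : List Int) : Prop := out = solution_alt prices
instance (prices : List Int) (out : List Int) : Decidable (Spec_solution prices out) := by unfold Spec_solution; infer_instance

-- ===== CLAIM (what is proved, stated in full; the proofs are below) =====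
def Claim_equal_solution : Prop := ∀ (prices : List Int), Dom_solution prices → Spec_solution prices (solution prices)

-- ===== LEMMAS AND PROOFS =====

-- popping with a weaker threshold after a stronger one: the first pop is subsumed
theorem popGE_popGE (p q : Int) (h : p ≤ q) :
    ∀ t : List (Int × Int), popGE p (popGE q t) = popGE p t := by
  intro t
  induction t with
  | nil => rfl
  | cons hd tl ih =>
    obtain ⟨j, r⟩ := hd
    by_cases hr : r ≥ q
    · have hrp : r ≥ p := le_trans h hr
      simp [popGE, hr, hrp, ih]
    · simp [popGE, hr]

-- the stack computed by goB, in isolation (it does not depend on n)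
def build : Int → List Int → List (Int × Int)
  | _, [] => []
  | i, p :: rest => (i, p) :: popGE p (build (i + 1) rest)

theorem goB_fst (n : Int) : ∀ (s : List Int) (i : Int), (goB n i s).1 = build i s := by
  intro s
  induction s with
  | nil => intro i; rfl
  | cons p rest ih => intro i; simp [goB, build, ih]

-- key invariant: scanning the suffix s (starting at absolute index i) for the first
-- price < p is answered by the popped stack: its top's index, or else s.length
theorem cntA_eq_stack : ∀ (s : List Int) (i p : Int),
    cntA p s =
      (match popGE p (build i s) with
       | [] => (s.length : Int)
       | (j, _) :: _ => j - i + 1) := by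
  intro s
  induction s with
  | nil => intro i p; simp [cntA, build, popGE]
  | cons q qs ih =>
    intro i p
    by_cases hq : q < p
    · have : ¬ q ≥ p := by omega
      simp [cntA, build, popGE, hq, this]
    · have hqp : q ≥ p := by omega
      simp only [cntA, build, popGE, if_pos hqp, if_neg hq]
      rw [popGE_popGE p q hqp, ih (i + 1) p]
      cases h : popGE p (build (i + 1) qs) with
      | nil => simp; ring
      | cons hd tl => obtain ⟨j, r⟩ := hd; simp; ring

theorem goB_snd : ∀ (s : List Int) (i n : Int), n = i + s.length →
    (goB n i s).2 = solution s := by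
  intro s
  induction s with
  | nil => intro i n _; rfl
  | cons p rest ih =>
    intro i n hn
    simp only [goB, solution]
    rw [goB_fst, ih (i + 1) n (by simp only [List.length_cons] at hn; push_cast at hn; linarith)]
    have hh : (match popGE p (build (i + 1) rest) with
        | [] => n - 1 - i
        | (j, _) :: _ => j - i) = cntA p rest := by
      rw [cntA_eq_stack rest (i + 1) p]
      cases h : popGE p (build (i + 1) rest) with
      | nil => simp only [List.length_cons] at hn; push_cast at hn; linarith
      | cons hd tl => obtain ⟨j, r⟩ := hd; ring
    rw [hh]

-- ===== VERDICT (by name: the statement is the Claim_ definition above) =====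
theorem solution_spec : Claim_equal_solution := by
  intro prices _
  unfold Spec_solution solution_alt
  exact (goB_snd prices 0 (prices.length : Int) (by simp)).symm
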